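-- pv_equiv track=rewrite | github.com/rupeshmohanty/Competitive-programming-problems | Python/Additonal Questions/TCS Xplore/find_novowels.py | find_Novowels
-- ===== SOURCE A (Python) =====
-- def find_Novowels(l):
-- 	no_vowels = []
--
-- 	vowels = ['a','e','i','o','u']
--
-- 	for i in l:
-- 		flag = 0
-- 		for j in vowels:
-- 			if j in i:
-- 				flag = 0
-- 				break
-- 			else:
-- 				flag = 1
--
-- 		if flag:
-- 			no_vowels.append(i)
--
-- 	return no_vowels
-- ===== SOURCE B (Python) =====
-- def find_Novowels(l):
--     # Back-to-front construction; a string is kept iff deleting all vowels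
--     # (via str.translate) leaves it unchanged.
--     delete_vowels = str.maketrans('', '', 'aeiou')
--     out = []
--     for head in reversed(l):
--         if head.translate(delete_vowels) == head:
--             out.append(head)
--     out.reverse()
--     return out
-- ===== Notes on version B (the rewrite author's own statement) =====
-- stated objective: alternative
-- what changed: Replaces A's inner loop over the five vowels with flag/break by a vowel-free test via str.translate (the string equals its vowel-deleted translation), and builds the result back-to-front over reversed(l) followed by a final reverse.
import Mathlib
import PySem

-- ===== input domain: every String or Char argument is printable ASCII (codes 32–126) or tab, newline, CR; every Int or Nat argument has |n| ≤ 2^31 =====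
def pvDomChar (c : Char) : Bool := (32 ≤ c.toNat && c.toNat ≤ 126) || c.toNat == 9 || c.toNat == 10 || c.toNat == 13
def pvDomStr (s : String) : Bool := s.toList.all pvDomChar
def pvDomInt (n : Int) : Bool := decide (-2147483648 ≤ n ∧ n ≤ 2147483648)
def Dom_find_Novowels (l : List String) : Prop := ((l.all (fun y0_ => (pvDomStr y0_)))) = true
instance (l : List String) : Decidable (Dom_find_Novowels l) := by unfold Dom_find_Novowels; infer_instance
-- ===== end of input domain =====

-- B iterates reversed(l), keeping a string iff deleting its vowels (translate) leaves it unchanged, then reverses; same output, different decomposition and test.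

-- ===== PORT A =====
-- inner 'for j in vowels: if j in i: flag = 0; break else: flag = 1'
def pvInnerA (vs : List String) (i : String) (flag : Int) : Int :=
  match vs with
  | [] => flag
  | j :: rest => if PySem.Str.isIn j i then 0 else pvInnerA rest i 1

def find_Novowels (l : List String) : List String :=
  l.foldl (fun no_vowels i =>
    let flag := pvInnerA ["a", "e", "i", "o", "u"] i 0
    if flag ≠ 0 then no_vowels ++ [i] else no_vowels) []

-- ===== PORT B =====
-- head.translate(delete_vowels): one pass over the string deleting the chars of 'aeiou' (exact on all strings)
def pvDeleteVowels (s : String) : String :=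
  String.ofList (s.toList.filter (fun c => c ∉ "aeiou".toList))

def find_Novowels_alt (l : List String) : List String :=
  (l.reverse.foldl (fun out head =>
    if pvDeleteVowels head = head then out ++ [head] else out) []).reverse

-- ===== PRECONDITION & SPEC =====
def Spec_find_Novowels (l : List String) (out : List String) : Prop := out = find_Novowels_alt l
instance (l : List String) (out : List String) : Decidable (Spec_find_Novowels l out) := by unfold Spec_find_Novowels; infer_instance

-- ===== CLAIM (what is proved, stated in full; the proofs are below) =====
def Claim_equal_find_Novowels : Prop := ∀ (l : List String), Dom_find_Novowels l → Spec_find_Novowels l (find_Novowels l)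

-- ===== LEMMAS AND PROOFS =====

theorem pv_aeiou : "aeiou".toList = ['a', 'e', 'i', 'o', 'u'] := by decide

-- a one-character string is a substring iff that character occurs
theorem pv_isIn_char (sub : String) (c : Char) (hs : sub.toList = [c]) (i : String) :
    PySem.Str.isIn sub i = true ↔ c ∈ i.toList := by
  rw [PySem.Str.isIn_iff_infix, hs, List.singleton_infix_iff]

theorem pv_innerA_ne_zero (i : String) :
    (pvInnerA ["a", "e", "i", "o", "u"] i 0 ≠ 0) ↔
      ∀ c ∈ i.toList, c ∉ ("aeiou".toList) := by
  have ha := pv_isIn_char "a" 'a' (by decide) i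
  have he := pv_isIn_char "e" 'e' (by decide) i
  have hi := pv_isIn_char "i" 'i' (by decide) i
  have ho := pv_isIn_char "o" 'o' (by decide) i
  have hu := pv_isIn_char "u" 'u' (by decide) i
  simp only [pvInnerA, pv_aeiou]
  constructor
  · intro h c hc hm
    split_ifs at h with h1 h2 h3 h4 h5
    · exact h rfl
    · exact h rfl
    · exact h rfl
    · exact h rfl
    · exact h rfl
    · have na : 'a' ∉ i.toList := fun hx => h1 (ha.mpr hx)
      have ne : 'e' ∉ i.toList := fun hx => h2 (he.mpr hx)
      have ni : 'i' ∉ i.toList := fun hx => h3 (hi.mpr hx)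
      have no : 'o' ∉ i.toList := fun hx => h4 (ho.mpr hx)
      have nu : 'u' ∉ i.toList := fun hx => h5 (hu.mpr hx)
      fin_cases hm
      · exact na hc
      · exact ne hc
      · exact ni hc
      · exact no hc
      · exact nu hc
  · intro h
    split_ifs with h1 h2 h3 h4 h5
    · exact absurd (ha.mp h1) (fun hx => h 'a' hx (by decide))
    · exact absurd (he.mp h2) (fun hx => h 'e' hx (by decide))
    · exact absurd (hi.mp h3) (fun hx => h 'i' hx (by decide))
    · exact absurd (ho.mp h4) (fun hx => h 'o' hx (by decide))
    · exact absurd (hu.mp h5) (fun hx => h 'u' hx (by decide))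
    · decide

-- B's keep-test equals A's flag-test
theorem pv_keep_eq (i : String) :
    (pvDeleteVowels i = i) ↔ (pvInnerA ["a", "e", "i", "o", "u"] i 0 ≠ 0) := by
  rw [pv_innerA_ne_zero, pvDeleteVowels]
  constructor
  · intro h c hc hm
    have ht : i.toList.filter (fun c => decide (c ∉ "aeiou".toList)) = i.toList := by
      have := congrArg String.toList h
      rwa [String.toList_ofList] at this
    rw [List.filter_eq_self] at ht
    have hcc := ht c hc
    simp only [decide_eq_true_eq] at hcc
    exact hcc hm
  · intro h
    have ht : i.toList.filter (fun c => decide (c ∉ "aeiou".toList)) = i.toList := by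
      rw [List.filter_eq_self]
      intro c hc
      exact decide_eq_true (h c hc)
    calc String.ofList (i.toList.filter (fun c => decide (c ∉ "aeiou".toList)))
        = String.ofList i.toList := by rw [ht]
      _ = i := String.ofList_toList

-- a filtering foldl-with-append equals acc ++ filter, for any Bool test
theorem pv_fold_filter (l : List String) (acc : List String) :
    l.foldl (fun out head => if pvDeleteVowels head = head then out ++ [head] else out) acc
      = acc ++ l.filter (fun i => decide (pvDeleteVowels i = i)) := by
  induction l generalizing acc with
  | nil => simp
  | cons x xs ih =>
    rw [List.foldl_cons]
    by_cases hp : pvDeleteVowels x = x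
    · rw [if_pos hp, ih, List.filter_cons, if_pos (decide_eq_true hp), List.append_assoc]; rfl
    · rw [if_neg hp, ih, List.filter_cons, if_neg (by simpa using hp)]

theorem pv_fold_A (l : List String) (acc : List String) :
    l.foldl (fun no_vowels i =>
        let flag := pvInnerA ["a", "e", "i", "o", "u"] i 0
        if flag ≠ 0 then no_vowels ++ [i] else no_vowels) acc
      = acc ++ l.filter (fun i => decide (pvDeleteVowels i = i)) := by
  induction l generalizing acc with
  | nil => simp
  | cons x xs ih =>
    rw [List.foldl_cons]
    have hstep : (let flag := pvInnerA ["a", "e", "i", "o", "u"] x 0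
        if flag ≠ 0 then acc ++ [x] else acc)
        = if pvInnerA ["a", "e", "i", "o", "u"] x 0 ≠ 0 then acc ++ [x] else acc := rfl
    rw [hstep]
    by_cases hp : pvInnerA ["a", "e", "i", "o", "u"] x 0 ≠ 0
    · rw [if_pos hp, ih, List.filter_cons, if_pos (decide_eq_true ((pv_keep_eq x).mpr hp)),
        List.append_assoc]
      rfl
    · rw [if_neg hp, ih, List.filter_cons,
        if_neg (by simpa using fun hk => hp ((pv_keep_eq x).mp hk))]

-- ===== VERDICT (by name: the statement is the Claim_ definition above) =====
theorem find_Novowels_spec : Claim_equal_find_Novowels := by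
  intro l _
  show find_Novowels l = find_Novowels_alt l
  unfold find_Novowels find_Novowels_alt
  rw [pv_fold_A, pv_fold_filter, List.nil_append, List.nil_append,
    List.filter_reverse, List.reverse_reverse]
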